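-- pv_equiv track=rewrite | github.com/Harshaharika7/HackerRankDay30.py | print_queue.py | summingPieces
-- ===== SOURCE A (Python) =====
-- from itertools import product
--
-- def summingPieces(arr):
--     n = len(arr)
--     total = 0
--
--     # Try all possible ways to cut the array into contiguous segments
--     for mask in product([0, 1], repeat=n-1):  # 2^(n-1) cuts
--         current_segment = []
--         result = 0
--         for i in range(n):
--             current_segment.append(arr[i])
--             if i == n-1 or mask[i] == 1:
--                 result += len(current_segment) * sum(current_segment)
--                 current_segment = []
--         total += result
--
--     return total
-- ===== SOURCE B (Python) =====
-- def summingPieces(arr):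
--     # Closed form: over all 2^(n-1) partitions, element arr[i] is counted with
--     # total weight 3*2^(n-1) - 2^i - 2^(n-1-i).
--     n = len(arr)
--     total = 0
--     for i in range(n):
--         total += arr[i] * (3 * 2 ** (n - 1) - 2 ** i - 2 ** (n - 1 - i))
--     return total
-- ===== Notes on version B (the rewrite author's own statement) =====
-- stated objective: faster
-- what changed: Replaces the enumeration of all 2^(n-1) cut masks by a single linear pass that multiplies each element by its closed-form partition weight 3*2^(n-1) - 2^i - 2^(n-1-i).
-- outside the precondition, e.g. on summingPieces([]): A raises ValueError, B returns 0
import Mathlib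
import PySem

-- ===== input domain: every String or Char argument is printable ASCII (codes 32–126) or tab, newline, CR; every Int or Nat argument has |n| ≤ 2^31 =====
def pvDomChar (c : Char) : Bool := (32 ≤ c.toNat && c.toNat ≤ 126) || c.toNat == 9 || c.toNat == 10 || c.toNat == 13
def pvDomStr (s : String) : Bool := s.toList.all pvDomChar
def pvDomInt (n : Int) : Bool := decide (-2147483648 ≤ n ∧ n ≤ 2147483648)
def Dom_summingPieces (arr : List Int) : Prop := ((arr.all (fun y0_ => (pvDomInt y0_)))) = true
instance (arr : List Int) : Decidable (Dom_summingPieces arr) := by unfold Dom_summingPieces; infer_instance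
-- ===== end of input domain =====

-- B replaces A's enumeration of all 2^(n-1) cut masks by one linear pass using each
-- element's closed-form partition weight; A raises on [] (excluded by Pre_), B returns 0 there.

-- ===== PORT A =====
-- product([0, 1], repeat=m): first factor is the outermost loop
def pvMasks : Nat → List (List Int)
  | 0 => [[]]
  | m + 1 => ([0, 1] : List Int).flatMap (fun b => (pvMasks m).map (fun t => b :: t))

-- one step of A's inner loop over i in range(n); state = (current_segment, result).
-- arr[i] and mask[i] are accessed only in range here, so pyGetD _ _ 0 is exact.
def pvInnerStep (arr mask : List Int) (n : Nat) (st : List Int × Int) (i : Nat) : List Int × Int :=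
  let seg := st.1 ++ [PySem.List.pyGetD arr (↑i) 0]
  if i = n - 1 ∨ PySem.List.pyGetD mask (↑i) 0 = 1 then
    ([], st.2 + (seg.length : Int) * seg.sum)
  else (seg, st.2)

-- Python raises ValueError when arr = [] (repeat = -1); [] is excluded by Pre_.
def summingPieces (arr : List Int) : Int :=
  (pvMasks (arr.length - 1)).foldl
    (fun total mask =>
      total + ((List.range arr.length).foldl (pvInnerStep arr mask arr.length) ([], 0)).2) 0

-- ===== PORT B =====
def summingPieces_alt (arr : List Int) : Int :=
  (List.range arr.length).foldl
    (fun (total : Int) (i : Nat) =>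
      total + PySem.List.pyGetD arr (↑i) 0 *
        (3 * (2:Int) ^ (arr.length - 1) - (2:Int) ^ i - (2:Int) ^ (arr.length - 1 - i))) 0

-- ===== PRECONDITION & SPEC =====
-- A raises ValueError on the empty list (product with repeat=-1), hence [] is excluded.
def Pre_summingPieces (arr : List Int) : Prop := arr ≠ []
instance (arr : List Int) : Decidable (Pre_summingPieces arr) := by unfold Pre_summingPieces; infer_instance
def pvWitness_summingPieces : List Int := [1, -2, 3]

def Spec_summingPieces (arr : List Int) (out : Int) : Prop := out = summingPieces_alt arr
instance (arr : List Int) (out : Int) : Decidable (Spec_summingPieces arr out) := by unfold Spec_summingPieces; infer_instance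

-- ===== CLAIM (what is proved, stated in full; the proofs are below) =====
def Claim_equal_summingPieces : Prop := ∀ (arr : List Int), Dom_summingPieces arr → Pre_summingPieces arr → Spec_summingPieces arr (summingPieces arr)

-- ===== LEMMAS AND PROOFS =====

-- recursive form of A's inner loop: wRec mask rest L S, where (L, S) are the length
-- and sum of the current segment and rest is the unprocessed suffix of arr
def pvWRec : List Int → List Int → Int → Int → Int
  | _, [], _, _ => 0
  | mask, x :: rest, L, S =>
    if rest.isEmpty then (L + 1) * (S + x)
    else
      match mask with
      | [] => pvWRec [] rest (L + 1) (S + x)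
      | b :: mt =>
        if b = 1 then (L + 1) * (S + x) + pvWRec mt rest 0 0
        else pvWRec mt rest (L + 1) (S + x)

def pvGsum (m : Nat) (arr : List Int) (L S : Int) : Int :=
  ((pvMasks m).map (fun mask => pvWRec mask arr L S)).sum

-- Rf arr = Σ arr[i] * 2^(n-1-i);  Cf arr = A's total, in closed form
def pvRf : List Int → Int
  | [] => 0
  | x :: t => x * 2 ^ t.length + pvRf t

def pvCf : List Int → Int
  | [] => 0
  | x :: t => 2 * pvCf t + pvRf t + x * (2 ^ (t.length + 1) - 1)

lemma pvMasks_length (m : Nat) : (pvMasks m).length = 2 ^ m := by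
  induction m with
  | zero => rfl
  | succ k ih => simp [pvMasks, ih, pow_succ]; ring

lemma sum_map_add {α : Type} (l : List α) (f g : α → Int) :
    (l.map (fun x => f x + g x)).sum = (l.map f).sum + (l.map g).sum := by
  induction l with
  | nil => simp
  | cons x t ih => simp [ih]; ring

lemma sum_map_const_add {α : Type} (l : List α) (c : Int) (f : α → Int) :
    (l.map (fun x => c + f x)).sum = (l.length : Int) * c + (l.map f).sum := by
  induction l with
  | nil => simp
  | cons x t ih => simp [ih]; ring
lemma inner_bridge (arr mask : List Int) :
    ∀ (t : List Int) (i : Nat), i + t.length = arr.length → arr.drop i = t →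
    ∀ (seg : List Int) (res : Int),
      ((List.range' i t.length).foldl (pvInnerStep arr mask arr.length) (seg, res)).2
        = res + pvWRec (mask.drop i) t (seg.length : Int) seg.sum := by
  intro t
  induction t with
  | nil => intro i _ _ seg res; simp [pvWRec]
  | cons x rest ih =>
    intro i hlen hdrop seg res
    have hx : PySem.List.pyGetD arr (↑i) 0 = x := by
      have h0 : arr[i]? = some x := by
        have h : (List.drop i arr)[0]? = arr[i + 0]? := List.getElem?_drop
        rw [hdrop] at h
        simpa using h.symm
      simp [PySem.List.pyGetD_natCast, List.getD_eq_getElem?_getD, h0]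
    have hdrop' : arr.drop (i + 1) = rest := by
      rw [← List.tail_drop, hdrop]; rfl
    have hlen' : (i + 1) + rest.length = arr.length := by
      simp at hlen; omega
    have hl : ((seg ++ [x]).length : Int) = (seg.length : Int) + 1 := by simp
    have hs : (seg ++ [x]).sum = seg.sum + x := by simp
    cases rest with
    | nil =>
      have hieq : i = arr.length - 1 := by simp at hlen; omega
      have hstep : pvInnerStep arr mask arr.length (seg, res) i
          = ([], res + ((seg ++ [x]).length : Int) * (seg ++ [x]).sum) := by
        simp [pvInnerStep, hx]
        exact fun h => absurd hieq h
      rw [show List.range' i ([x] : List Int).length = [i] from rfl, List.foldl_cons,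
        hstep, List.foldl_nil]
      simp [pvWRec, hs]
    | cons y rest' =>
      have hine : ¬ (i = arr.length - 1) := by simp at hlen; omega
      rcases hm : mask.drop i with _ | ⟨b, mt⟩
      · have hbit : PySem.List.pyGetD mask (↑i) 0 = 0 := by
          have h0 : mask[i]? = none := by
            have h : (List.drop i mask)[0]? = mask[i + 0]? := List.getElem?_drop
            rw [hm] at h
            simpa using h.symm
          simp [PySem.List.pyGetD_natCast, List.getD_eq_getElem?_getD, h0]
        have hmt : mask.drop (i + 1) = [] := by rw [← List.tail_drop, hm]; rfl
        have hstep : pvInnerStep arr mask arr.length (seg, res) i = (seg ++ [x], res) := by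
          simp [pvInnerStep, hx, hbit, hine]
        have IH := ih (i + 1) hlen' hdrop' (seg ++ [x]) res
        simp only [List.length_cons] at IH
        simp only [List.length_cons]
        rw [List.range'_succ, List.foldl_cons, hstep, IH]
        simp only [hmt, hl, hs]
        simp [pvWRec]
      · have hbit : PySem.List.pyGetD mask (↑i) 0 = b := by
          have h0 : mask[i]? = some b := by
            have h : (List.drop i mask)[0]? = mask[i + 0]? := List.getElem?_drop
            rw [hm] at h
            simpa using h.symm
          simp [PySem.List.pyGetD_natCast, List.getD_eq_getElem?_getD, h0]
        have hmt : mask.drop (i + 1) = mt := by rw [← List.tail_drop, hm]; rfl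
        by_cases hb : b = 1
        · have hbit2 : mask[i]?.getD 0 = 1 := by
            have h := hbit
            simp [PySem.List.pyGetD_natCast, List.getD_eq_getElem?_getD] at h
            rw [h, hb]
          have hstep : pvInnerStep arr mask arr.length (seg, res) i
              = ([], res + ((seg ++ [x]).length : Int) * (seg ++ [x]).sum) := by
            simp [pvInnerStep, hx]
            exact fun _ => hbit2
          have IH := ih (i + 1) hlen' hdrop'
            [] (res + ((seg ++ [x]).length : Int) * (seg ++ [x]).sum)
          simp only [List.length_cons] at IH
          simp only [List.length_cons]
          rw [List.range'_succ, List.foldl_cons, hstep, IH]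
          simp only [hmt, hl, hs]
          simp [pvWRec, hb]
          ring
        · have hstep : pvInnerStep arr mask arr.length (seg, res) i = (seg ++ [x], res) := by
            simp [pvInnerStep, hx, hbit, hine, hb]
          have IH := ih (i + 1) hlen' hdrop' (seg ++ [x]) res
          simp only [List.length_cons] at IH
          simp only [List.length_cons]
          rw [List.range'_succ, List.foldl_cons, hstep, IH]
          simp only [hmt, hl, hs]
          simp [pvWRec, hb]
lemma pvGsum_closed : ∀ (arr : List Int), arr ≠ [] → ∀ (L S : Int),
    pvGsum (arr.length - 1) arr L S
      = pvCf arr + L * S * 2 ^ (arr.length - 1) + L * pvRf arr + S * (2 ^ arr.length - 1) := by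
  intro arr
  induction arr with
  | nil => intro h; exact absurd rfl h
  | cons x t ih =>
    intro _ L S
    cases t with
    | nil =>
      simp [pvGsum, pvMasks, pvWRec, pvCf, pvRf]
      ring
    | cons y t' =>
      have k0 : ∀ tm ∈ pvMasks t'.length,
          ((fun mask => pvWRec mask (x :: y :: t') L S) ∘ (fun s => (0:Int) :: s)) tm
            = pvWRec tm (y :: t') (L + 1) (S + x) := by
        intro tm _; simp [pvWRec]
      have k1 : ∀ tm ∈ pvMasks t'.length,
          ((fun mask => pvWRec mask (x :: y :: t') L S) ∘ (fun s => (1:Int) :: s)) tm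
            = (L + 1) * (S + x) + pvWRec tm (y :: t') 0 0 := by
        intro tm _; simp [pvWRec]
      have hexp : pvGsum ((x :: y :: t').length - 1) (x :: y :: t') L S
          = pvGsum t'.length (y :: t') (L + 1) (S + x)
            + ((2:Int) ^ t'.length * ((L + 1) * (S + x)) + pvGsum t'.length (y :: t') 0 0) := by
        show pvGsum (t'.length + 1) (x :: y :: t') L S = _
        unfold pvGsum
        simp only [pvMasks, List.flatMap_cons, List.flatMap_nil, List.append_nil,
          List.map_append, List.map_map, List.sum_append]
        rw [List.map_congr_left k0, List.map_congr_left k1,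
          sum_map_const_add (pvMasks t'.length) ((L + 1) * (S + x))
            (fun tm => pvWRec tm (y :: t') 0 0),
          pvMasks_length]
        push_cast
        ring
      rw [hexp]
      have ihs := ih (by simp)
      simp only [List.length_cons, Nat.add_sub_cancel] at ihs ⊢
      rw [ihs (L + 1) (S + x), ihs 0 0]
      rw [show pvCf (x :: y :: t') = 2 * pvCf (y :: t') + pvRf (y :: t')
            + x * (2 ^ ((y :: t').length + 1) - 1) from rfl,
          show pvRf (x :: y :: t') = x * 2 ^ (y :: t').length + pvRf (y :: t') from rfl]
      simp only [List.length_cons, pow_succ]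
      ring
lemma sumRf : ∀ (t : List Int),
    ((List.range t.length).map
      (fun (i : Nat) => PySem.List.pyGetD t (↑i) 0 * (2:Int) ^ (t.length - 1 - i))).sum = pvRf t := by
  intro t
  induction t with
  | nil => simp [pvRf]
  | cons x t ih =>
    simp only [List.length_cons, List.range_succ_eq_map, List.map_cons, List.map_map, List.sum_cons]
    rw [pvRf, ← ih]
    congr 1
    · simp
    · refine congrArg List.sum (List.map_congr_left ?_)
      intro i hi
      simp only [Function.comp_apply, Nat.succ_eq_add_one, PySem.List.pyGetD_natCast,
        List.getD_cons_succ, Nat.add_sub_cancel]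
      have he : t.length - (i + 1) = t.length - 1 - i := by omega
      rw [he]

lemma sumCf : ∀ (t : List Int),
    ((List.range t.length).map
      (fun (i : Nat) => PySem.List.pyGetD t (↑i) 0 *
        (3 * (2:Int) ^ (t.length - 1) - (2:Int) ^ i - (2:Int) ^ (t.length - 1 - i)))).sum = pvCf t := by
  intro t
  induction t with
  | nil => simp [pvCf]
  | cons x t ih =>
    simp only [List.length_cons, List.range_succ_eq_map, List.map_cons, List.map_map, List.sum_cons]
    rw [pvCf, ← ih, ← sumRf t, ← List.sum_map_mul_left, ← sum_map_add]
    rw [add_comm (((List.range t.length).map _).sum)]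
    congr 1
    · simp only [Nat.cast_zero, PySem.List.pyGetD_zero_cons, Nat.add_sub_cancel, Nat.sub_zero,
        pow_zero]
      rw [pow_succ]
      ring
    · refine congrArg List.sum (List.map_congr_left ?_)
      intro i hi
      have hi' : i < t.length := List.mem_range.mp hi
      simp only [Function.comp_apply, Nat.succ_eq_add_one, PySem.List.pyGetD_natCast,
        List.getD_cons_succ, Nat.add_sub_cancel]
      have he : t.length - (i + 1) = t.length - 1 - i := by omega
      have h3 : (2:Int) ^ t.length = 2 ^ (t.length - 1) * 2 := by
        rw [← pow_succ]; congr 1; omega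
      have h4 : (2:Int) ^ (i + 1) = 2 ^ i * 2 := by rw [pow_succ]
      rw [he, h3, h4]
      ring

lemma alt_eq_Cf (arr : List Int) : summingPieces_alt arr = pvCf arr := by
  unfold summingPieces_alt
  rw [PySem.List.foldl_add]
  simpa using sumCf arr

-- ===== VERDICT (by name: the statement is the Claim_ definition above) =====
theorem summingPieces_spec : Claim_equal_summingPieces := by
  intro arr _ hpre
  unfold Spec_summingPieces summingPieces
  rw [PySem.List.foldl_add, alt_eq_Cf]
  have hmap : (pvMasks (arr.length - 1)).map
      (fun mask => ((List.range arr.length).foldl (pvInnerStep arr mask arr.length) ([], 0)).2)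
      = (pvMasks (arr.length - 1)).map (fun mask => pvWRec mask arr 0 0) := by
    apply List.map_congr_left
    intro mask _
    rw [List.range_eq_range']
    simpa using inner_bridge arr mask arr 0 (by simp) (by simp) [] 0
  rw [hmap]
  have h := pvGsum_closed arr hpre 0 0
  unfold pvGsum at h
  rw [h]; ring
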